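-- pv_equiv track=rewrite | github.com/sguccibnr32-creator/Public | forensic_anchors/full_recompute/full_recompute_tier2_runner.py | extract_numerics
-- ===== SOURCE A (Python) =====
-- def extract_numerics(stdout, patterns):
--     matches = {}
--     lines = stdout.splitlines()
--     for p in patterns:
--         hits = [ln.strip() for ln in lines if p.lower() in ln.lower()]
--         if hits:
--             matches[p] = hits[:6]
--     return matches
-- ===== SOURCE B (Python) =====
-- def extract_numerics(stdout, patterns):
--     lines = stdout.splitlines()
--     lowered = [(ln, ln.lower()) for ln in lines]
--     upats = [(p, p.lower()) for p in dict.fromkeys(patterns)]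
--     acc = {}
--     for ln, low in lowered:
--         for p, lp in upats:
--             if lp in low:
--                 cur = acc.get(p)
--                 if cur is None:
--                     acc[p] = [ln.strip()]
--                 elif len(cur) < 6:
--                     acc[p] = cur + [ln.strip()]
--     return {p: acc[p] for p in patterns if p in acc}
-- ===== Notes on version B (the rewrite author's own statement) =====
-- stated objective: alternative
-- what changed: B inverts the loop nesting: it lowercases every line once, then scans lines in the outer loop, lazily growing each pattern's hit list in a dict with a per-pattern cap of 6, and finally emits the dict in pattern order; A instead filters the full line list per pattern and slices to 6.
import Mathlib
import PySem

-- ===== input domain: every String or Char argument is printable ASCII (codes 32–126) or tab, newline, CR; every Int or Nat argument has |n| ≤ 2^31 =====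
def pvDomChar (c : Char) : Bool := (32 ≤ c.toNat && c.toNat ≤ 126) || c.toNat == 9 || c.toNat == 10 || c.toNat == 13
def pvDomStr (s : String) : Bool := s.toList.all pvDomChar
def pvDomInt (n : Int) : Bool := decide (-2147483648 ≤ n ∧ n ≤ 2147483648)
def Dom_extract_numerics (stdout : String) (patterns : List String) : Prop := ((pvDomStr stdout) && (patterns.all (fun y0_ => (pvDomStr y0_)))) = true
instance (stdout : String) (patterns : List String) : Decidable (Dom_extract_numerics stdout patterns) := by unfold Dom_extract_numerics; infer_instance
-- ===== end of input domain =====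

-- B lowercases each line once and scans lines in the outer loop with a per-pattern 6-cap,
-- instead of A's per-pattern full filter; same return value, different decomposition.


-- ===== PORT A =====
def extract_numerics (stdout : String) (patterns : List String) : List (String × List String) :=
  let lines := PySem.Str.splitlines stdout
  (patterns.foldl (fun (m : PySem.Dict String (List String)) p =>
      let hits := (lines.filter (fun ln =>
          PySem.Str.isIn (PySem.Str.lower p) (PySem.Str.lower ln))).map (fun ln => PySem.Str.strip ln)
      if hits = [] then m else m.insert p (PySem.List.slice hits none (some 6)))
    PySem.Dict.empty).items

-- ===== PORT B =====
def extract_numerics_alt (stdout : String) (patterns : List String) : List (String × List String) :=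
  let lines := PySem.Str.splitlines stdout
  let lowered := lines.map (fun ln => (ln, PySem.Str.lower ln))
  let upats := (PySem.List.dedup patterns).map (fun p => (p, PySem.Str.lower p))
  let acc := lowered.foldl (fun (acc : PySem.Dict String (List String)) pr =>
      upats.foldl (fun acc q =>
        if PySem.Str.isIn q.2 pr.2 then
          match acc.get? q.1 with
          | none => acc.insert q.1 [PySem.Str.strip pr.1]
          | some cur => if cur.length < 6 then acc.insert q.1 (cur ++ [PySem.Str.strip pr.1]) else acc
        else acc) acc)
    PySem.Dict.empty
  (patterns.foldl (fun (m : PySem.Dict String (List String)) p =>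
      if acc.contains p then m.insert p (acc.getD p []) else m)
    PySem.Dict.empty).items

-- ===== PRECONDITION & SPEC =====
def Spec_extract_numerics (stdout : String) (patterns : List String) (out : List (String × List String)) : Prop := out = extract_numerics_alt stdout patterns
instance (stdout : String) (patterns : List String) (out : List (String × List String)) : Decidable (Spec_extract_numerics stdout patterns out) := by unfold Spec_extract_numerics; infer_instance

-- ===== CLAIM (what is proved, stated in full; the proofs are below) =====
def Claim_equal_extract_numerics : Prop := ∀ (stdout : String) (patterns : List String), Dom_extract_numerics stdout patterns → Spec_extract_numerics stdout patterns (extract_numerics stdout patterns)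

-- ===== LEMMAS AND PROOFS =====

-- the stripped matching lines for one pattern (A's list comprehension)
def pvHits (lines : List String) (p : String) : List String :=
  (lines.filter (fun ln => PySem.Str.isIn (PySem.Str.lower p) (PySem.Str.lower ln))).map
    (fun ln => PySem.Str.strip ln)

-- B's capped update of one pattern entry for one line
def pvUpd (acc : PySem.Dict String (List String)) (pr q : String × String) :
    PySem.Dict String (List String) :=
  if PySem.Str.isIn q.2 pr.2 then
    match acc.get? q.1 with
    | none => acc.insert q.1 [PySem.Str.strip pr.1]
    | some cur => if cur.length < 6 then acc.insert q.1 (cur ++ [PySem.Str.strip pr.1]) else acc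
  else acc

-- B's per-line inner loop over the (pattern, lowered pattern) list
def pvStep (upats : List (String × String)) (acc : PySem.Dict String (List String))
    (pr : String × String) : PySem.Dict String (List String) :=
  upats.foldl (fun a q => pvUpd a pr q) acc

theorem pvUpd_get?_ne (acc : PySem.Dict String (List String)) (pr q : String × String)
    (p : String) (hne : p ≠ q.1) : (pvUpd acc pr q).get? p = acc.get? p := by
  unfold pvUpd
  split_ifs with h
  · split
    · exact PySem.Dict.get?_insert_of_ne _ _ hne
    · split_ifs with hl
      · exact PySem.Dict.get?_insert_of_ne _ _ hne
      · rfl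
  · rfl

theorem pvUpd_get?_self (acc : PySem.Dict String (List String)) (pr : String × String)
    (p lp : String) :
    (pvUpd acc pr (p, lp)).get? p =
      if PySem.Str.isIn lp pr.2 then
        match acc.get? p with
        | none => some [PySem.Str.strip pr.1]
        | some cur => if cur.length < 6 then some (cur ++ [PySem.Str.strip pr.1]) else some cur
      else acc.get? p := by
  unfold pvUpd
  split_ifs with h
  · cases hg : acc.get? p with
    | none => simp [PySem.Dict.get?_insert_self]
    | some cur =>
      dsimp only
      split_ifs with hl
      · simp [PySem.Dict.get?_insert_self]
      · exact hg
  · rfl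

theorem pvStep_get?_notmem (upats : List (String × String)) (acc : PySem.Dict String (List String))
    (pr : String × String) (p : String) (hp : p ∉ upats.map Prod.fst) :
    (pvStep upats acc pr).get? p = acc.get? p := by
  induction upats generalizing acc with
  | nil => rfl
  | cons q rest ih =>
    simp only [List.map_cons, List.mem_cons, not_or] at hp
    show (pvStep rest (pvUpd acc pr q) pr).get? p = acc.get? p
    rw [ih _ hp.2, pvUpd_get?_ne acc pr q p hp.1]

theorem pvStep_get?_mem (upats : List (String × String)) (acc : PySem.Dict String (List String))
    (pr : String × String) (p lp : String) (hmem : (p, lp) ∈ upats)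
    (hnd : (upats.map Prod.fst).Nodup) :
    (pvStep upats acc pr).get? p =
      if PySem.Str.isIn lp pr.2 then
        match acc.get? p with
        | none => some [PySem.Str.strip pr.1]
        | some cur => if cur.length < 6 then some (cur ++ [PySem.Str.strip pr.1]) else some cur
      else acc.get? p := by
  induction upats generalizing acc with
  | nil => cases hmem
  | cons q rest ih =>
    simp only [List.map_cons, List.nodup_cons] at hnd
    show (pvStep rest (pvUpd acc pr q) pr).get? p = _
    rcases List.mem_cons.mp hmem with h | h
    · subst h
      rw [pvStep_get?_notmem rest _ pr p hnd.1]
      exact pvUpd_get?_self acc pr p lp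
    · have hne : p ≠ q.1 := by
        intro hEq
        exact hnd.1 (hEq ▸ (List.mem_map.mpr ⟨(p, lp), h, rfl⟩))
      rw [ih _ h hnd.2, pvUpd_get?_ne acc pr q p hne]

-- invariant of B's outer line loop, read at one pattern key
theorem pvLoop_get? (lines : List String) (upats : List (String × String))
    (hnd : (upats.map Prod.fst).Nodup)
    (p : String) (hmem : (p, PySem.Str.lower p) ∈ upats)
    (acc : PySem.Dict String (List String)) :
    ((lines.map (fun ln => (ln, PySem.Str.lower ln))).foldl (pvStep upats) acc).get? p =
      match acc.get? p with
      | none => if pvHits lines p = [] then none else some ((pvHits lines p).take 6)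
      | some cur => some (cur ++ (pvHits lines p).take (6 - cur.length)) := by
  induction lines generalizing acc with
  | nil =>
    cases hg : acc.get? p <;> simp [pvHits, hg]
  | cons ln rest ih =>
    simp only [List.map_cons, List.foldl_cons]
    rw [ih]
    rw [pvStep_get?_mem upats acc (ln, PySem.Str.lower ln) p (PySem.Str.lower p) hmem hnd]
    by_cases hin : PySem.Str.isIn (PySem.Str.lower p) (PySem.Str.lower ln) = true
    · have hhits : pvHits (ln :: rest) p = PySem.Str.strip ln :: pvHits rest p := by
        simp only [pvHits, List.filter_cons, hin, if_true, List.map_cons]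
      rw [hhits, if_pos hin]
      cases hg : acc.get? p with
      | none =>
        dsimp only
        cases hr : pvHits rest p <;> simp [List.take_succ_cons]
      | some cur =>
        dsimp only
        by_cases hl : cur.length < 6
        · rw [if_pos hl]
          dsimp only
          have h6 : 6 - cur.length = (6 - (cur ++ [PySem.Str.strip ln]).length) + 1 := by
            simp; omega
          rw [h6, List.take_succ_cons]
          simp
        · rw [if_neg hl]
          dsimp only
          have h0 : 6 - cur.length = 0 := by omega
          simp [h0]
    · have hhits : pvHits (ln :: rest) p = pvHits rest p := by
        have hin' : PySem.Str.isIn (PySem.Str.lower p) (PySem.Str.lower ln) = false :=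
          Bool.not_eq_true _ ▸ eq_false_of_ne_true hin
        simp only [pvHits, List.filter_cons, hin', Bool.false_eq_true, if_false]
      rw [hhits, if_neg hin]

-- the whole equivalence, phrased over pvHits / pvStep (definitionally the two ports)
theorem pvMain (lines : List String) (patterns : List String) :
    (patterns.foldl (fun (m : PySem.Dict String (List String)) p =>
        if pvHits lines p = [] then m
        else m.insert p (PySem.List.slice (pvHits lines p) none (some 6)))
      PySem.Dict.empty).items =
    (patterns.foldl (fun (m : PySem.Dict String (List String)) p =>
        if ((lines.map (fun ln => (ln, PySem.Str.lower ln))).foldl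
              (pvStep ((PySem.List.dedup patterns).map (fun p => (p, PySem.Str.lower p))))
              PySem.Dict.empty).contains p
        then m.insert p
          (((lines.map (fun ln => (ln, PySem.Str.lower ln))).foldl
              (pvStep ((PySem.List.dedup patterns).map (fun p => (p, PySem.Str.lower p))))
              PySem.Dict.empty).getD p [])
        else m)
      PySem.Dict.empty).items := by
  have hnd : (((PySem.List.dedup patterns).map (fun p => (p, PySem.Str.lower p))).map Prod.fst).Nodup := by
    simpa only [List.map_map, Function.comp_def, List.map_id'] using PySem.List.nodup_dedup patterns
  congr 1
  refine PySem.List.foldl_congr_mem patterns _ _ _ ?_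
  intro m p hp
  have hmem : (p, PySem.Str.lower p) ∈ (PySem.List.dedup patterns).map (fun p => (p, PySem.Str.lower p)) :=
    List.mem_map.mpr ⟨p, (PySem.List.mem_dedup patterns p).mpr hp, rfl⟩
  have hget := pvLoop_get? lines _ hnd p hmem PySem.Dict.empty
  rw [PySem.Dict.get?_empty] at hget
  by_cases hh : pvHits lines p = []
  · rw [if_pos hh]
    rw [if_neg ?_]
    rw [PySem.Dict.contains_eq_isSome_get?, hget]
    simp [hh]
  · rw [if_neg hh]
    rw [if_pos ?_]
    · congr 1
      · rw [PySem.Dict.getD_eq_get?_getD, hget, if_neg hh]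
        rw [PySem.List.slice_to _ (by norm_num)]
        rfl
    · rw [PySem.Dict.contains_eq_isSome_get?, hget, if_neg hh]
      rfl

-- ===== VERDICT (by name: the statement is the Claim_ definition above) =====
theorem extract_numerics_spec : Claim_equal_extract_numerics := by
  intro stdout patterns _
  exact pvMain (PySem.Str.splitlines stdout) patterns
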